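-- pv_equiv track=rewrite | github.com/ETO-leader/OI | qzoj/noip mock 2025/set22/down/grid/bf.py | solve
-- ===== SOURCE A (Python) =====
-- def merge_intervals(intervals):
--     if not intervals:
--         return []
--     intervals.sort()
--     res = []
--     cur_l, cur_r = intervals[0]
--     for l, r in intervals[1:]:
--         if l <= cur_r + 1:
--             cur_r = max(cur_r, r)
--         else:
--             res.append((cur_l, cur_r))
--             cur_l, cur_r = l, r
--     res.append((cur_l, cur_r))
--     return res
--
-- def intersects(a, b):
--     # a, b are lists of disjoint sorted intervals
--     i = j = 0
--     while i < len(a) and j < len(b):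
--         l1, r1 = a[i]
--         l2, r2 = b[j]
--         if r1 < l2:
--             i += 1
--         elif r2 < l1:
--             j += 1
--         else:
--             return True
--     return False
--
-- def solve(N, ops):
--     # ops: list of (p, l, r)
--     rows = [[] for _ in range(N+1)]  # 1-indexed
--     for p, l, r in ops:
--         rows[p].append((l, r))
--     for i in range(1, N+1):
--         rows[i] = merge_intervals(rows[i])
--
--     # DP longest path in DAG: dp[i] = length of longest path ending at i
--     dp = [0] * (N+1)
--     prev = [-1] * (N+1)
--     best_len = 0
--     best_end = 1
--     for j in range(1, N+1):
--         dp[j] = 1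
--         prev[j] = -1
--         for i in range(1, j):
--             if dp[i] + 1 > dp[j]:
--                 # if rows i and j intersect
--                 if intersects(rows[i], rows[j]):
--                     dp[j] = dp[i] + 1
--                     prev[j] = i
--         if dp[j] > best_len:
--             best_len = dp[j]
--             best_end = j
--
--     # reconstruct kept sequence
--     kept = []
--     cur = best_end
--     while cur != -1:
--         kept.append(cur)
--         cur = prev[cur]
--     kept.reverse()
--     kept_set = set(kept)
--     deleted = [i for i in range(1, N+1) if i not in kept_set]
--     return deleted
-- ===== SOURCE B (Python) =====
-- def merge_intervals(intervals):
--     if not intervals: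
--         return []
--     intervals.sort()
--     res = []
--     cur_l, cur_r = intervals[0]
--     for l, r in intervals[1:]:
--         if l <= cur_r + 1:
--             cur_r = max(cur_r, r)
--         else:
--             res.append((cur_l, cur_r))
--             cur_l, cur_r = l, r
--     res.append((cur_l, cur_r))
--     return res
--
-- def intersects(a, b):
--     # a, b are lists of disjoint sorted intervals
--     i = j = 0
--     while i < len(a) and j < len(b):
--         l1, r1 = a[i]
--         l2, r2 = b[j]
--         if r1 < l2:
--             i += 1
--         elif r2 < l1:
--             j += 1
--         else:
--             return True
--     return False
--
-- def solve(N, ops):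
--     # ops: list of (p, l, r)
--     rows = [[] for _ in range(N + 1)]  # 1-indexed
--     for p, l, r in ops:
--         rows[p].append((l, r))
--     for i in range(1, N + 1):
--         rows[i] = merge_intervals(rows[i])
--
--     # Memoized recursion building explicit kept chains: chain(j) is the longest
--     # chain of rows ending at j, as a list of row indices (no dp/prev arrays,
--     # no reconstruction pass).
--     memo = {}
--
--     def chain(j):
--         if j not in memo:
--             best = [j]
--             for i in range(1, j):
--                 ci = chain(i)
--                 if len(ci) + 1 > len(best):
--                     if intersects(rows[i], rows[j]):
--                         best = ci + [j]
--             memo[j] = best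
--         return memo[j]
--
--     kept = max((chain(j) for j in range(1, N + 1)), key=len)
--     return [i for i in range(1, N + 1) if i not in kept]
-- ===== Notes on version B (the rewrite author's own statement) =====
-- stated objective: alternative
-- what changed: The dp/prev arrays, running best_len/best_end argmax, prev-pointer reconstruction loop and kept-set are all removed: B computes, by a memoized recursive function, the explicit longest chain ending at each row as a list of row indices (improving it with the same strict test and predecessor order), then simply takes the first maximum-length chain with max(..., key=len) and filters against it.
import Mathlib
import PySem

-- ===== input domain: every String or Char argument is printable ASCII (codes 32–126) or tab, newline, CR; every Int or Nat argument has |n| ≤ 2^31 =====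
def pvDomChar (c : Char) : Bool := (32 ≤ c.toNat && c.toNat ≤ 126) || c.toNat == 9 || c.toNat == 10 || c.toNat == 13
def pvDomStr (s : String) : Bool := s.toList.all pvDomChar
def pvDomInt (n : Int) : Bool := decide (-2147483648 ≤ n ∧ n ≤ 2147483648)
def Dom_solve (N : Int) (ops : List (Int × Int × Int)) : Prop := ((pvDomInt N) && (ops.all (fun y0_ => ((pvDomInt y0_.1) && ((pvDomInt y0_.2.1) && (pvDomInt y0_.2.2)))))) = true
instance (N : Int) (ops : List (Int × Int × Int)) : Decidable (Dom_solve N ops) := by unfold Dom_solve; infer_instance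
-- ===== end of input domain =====

-- B removes A's dp/prev arrays, running best_len/best_end argmax, prev-pointer reconstruction
-- loop and kept-set: a memoized recursive function builds, for each row, the explicit longest
-- chain ending there as a list of row indices (same strict improvement test and predecessor
-- order), and the answer filters against the first maximum-length chain (max with key=len);
-- similar cost, 'alternative'.  merge_intervals / intersects and the row bucketing are
-- identical lines in Source A and Source B and are ported once, used by both ports.

-- ===== PORT A =====
-- merge_intervals (identical in Source A and Source B; sorts its internal list — not caller-visible)
def mergeIntervals (intervals : List (Int × Int)) : List (Int × Int) :=
  if intervals = [] then []
  else
    match PySem.List.sorted2 intervals (fun p => p.1) (fun p => p.2) with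
    | [] => []
    | first :: rest =>
      let st := rest.foldl
        (fun (st : List (Int × Int) × Int × Int) lr =>
          if lr.1 ≤ st.2.2 + 1 then (st.1, st.2.1, max st.2.2 lr.2)
          else (st.1 ++ [(st.2.1, st.2.2)], lr.1, lr.2))
        ([], first.1, first.2)
      st.1 ++ [(st.2.1, st.2.2)]

-- intersects (identical in Source A and Source B): the two-pointer while loop, as recursion on the
-- suffixes the pointers designate
def intersects : List (Int × Int) → List (Int × Int) → Bool
  | [], _ => false
  | _ :: _, [] => false
  | (l1, r1) :: as_, (l2, r2) :: bs =>
    if r1 < l2 then intersects as_ ((l2, r2) :: bs)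
    else if r2 < l1 then intersects ((l1, r1) :: as_) bs
    else true
termination_by a b => a.length + b.length

-- row bucketing + per-row merge (identical lines in Source A and Source B, ported once)
def buildRows (N : Int) (ops : List (Int × Int × Int)) : List (List (Int × Int)) :=
  let rows0 := List.replicate (N + 1).toNat ([] : List (Int × Int))
  let rows1 := ops.foldl
    (fun rows op =>
      PySem.List.pySetD rows op.1 (PySem.List.pyGetD rows op.1 [] ++ [(op.2.1, op.2.2)]))
    rows0
  (PySem.List.pyRange 1 (N + 1)).foldl
    (fun rows i => PySem.List.pySetD rows i (mergeIntervals (PySem.List.pyGetD rows i []))) rows1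

-- A's inner loop body: strict-improvement test, then the (short-circuited) intersection test
def innerStepA (rows : List (List (Int × Int))) (j : Int)
    (dpr : List Int × List Int) (i : Int) : List Int × List Int :=
  if PySem.List.pyGetD dpr.1 i 0 + 1 > PySem.List.pyGetD dpr.1 j 0 then
    if intersects (PySem.List.pyGetD rows i []) (PySem.List.pyGetD rows j []) then
      (PySem.List.pySetD dpr.1 j (PySem.List.pyGetD dpr.1 i 0 + 1), PySem.List.pySetD dpr.2 j i)
    else dpr
  else dpr

-- A's outer loop body: run the inner loop, then the running best_len/best_end update
def outerStepA (rows : List (List (Int × Int)))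
    (st : List Int × List Int × Int × Int) (j : Int) : List Int × List Int × Int × Int :=
  let inner := (PySem.List.pyRange 1 j).foldl (innerStepA rows j)
    (PySem.List.pySetD st.1 j 1, PySem.List.pySetD st.2.1 j (-1))
  if PySem.List.pyGetD inner.1 j 0 > st.2.2.1 then
    (inner.1, inner.2, PySem.List.pyGetD inner.1 j 0, j)
  else (inner.1, inner.2, st.2.2.1, st.2.2.2)

-- A's reconstruction while-loop (fuel N+2 ≥ any chain length; prev[cur] < cur so it never runs out)
def collectA (prev : List Int) : Nat → Int → List Int → List Int
  | 0, _, acc => acc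
  | f + 1, cur, acc =>
    if cur = -1 then acc
    else collectA prev f (PySem.List.pyGetD prev cur (-1)) (acc ++ [cur])

def solve (N : Int) (ops : List (Int × Int × Int)) : List Int :=
  let rows := buildRows N ops
  let st := (PySem.List.pyRange 1 (N + 1)).foldl (outerStepA rows)
    (List.replicate (N + 1).toNat 0, List.replicate (N + 1).toNat (-1), 0, 1)
  let kept := (collectA st.2.1 (N + 2).toNat st.2.2.2 []).reverse
  let keptSet := PySem.Set.ofList kept
  (PySem.List.pyRange 1 (N + 1)).filter (fun i => !(PySem.Set.contains keptSet i))

-- ===== PORT B =====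
-- B's memoized recursion chain(j) with its loop body; the Nat argument is fuel for Lean's
-- termination only (Python's recursion depth is bounded by j, so fuel N+1 never runs out
-- and the fuel-0 branch is unreachable); the memo dict is threaded through exactly as the
-- Python mutates it.
mutual
def chainB (rows : List (List (Int × Int))) :
    Nat → PySem.Dict Int (List Int) → Int → PySem.Dict Int (List Int) × List Int
  | 0, memo, j => (memo, [j])
  | f + 1, memo, j =>
    match memo.get? j with
    | some c => (memo, c)
    | none =>
      let st := (PySem.List.pyRange 1 j).foldl (chainStepB rows f j) (memo, [j])
      (st.1.insert j st.2, st.2)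
termination_by f _ _ => (f, 0)

-- the body of chain(j)'s for-loop: ci = chain(i); strict improvement test, then intersects
def chainStepB (rows : List (List (Int × Int))) (f : Nat) (j : Int)
    (st : PySem.Dict Int (List Int) × List Int) (i : Int) :
    PySem.Dict Int (List Int) × List Int :=
  let r := chainB rows f st.1 i
  if r.2.length + 1 > st.2.length then
    if intersects (PySem.List.pyGetD rows i []) (PySem.List.pyGetD rows j []) then
      (r.1, r.2 ++ [j])
    else (r.1, st.2)
  else (r.1, st.2)
termination_by (f, 1)
end

def solve_alt (N : Int) (ops : List (Int × Int × Int)) : List Int :=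
  let rows := buildRows N ops
  -- max(chain(j) for j in range(1, N+1), key=len): the generator calls chain(j) in order,
  -- threading the memo dict
  let st := (PySem.List.pyRange 1 (N + 1)).foldl
    (fun (st : PySem.Dict Int (List Int) × List (List Int)) j =>
      let r := chainB rows (N + 1).toNat st.1 j
      (r.1, st.2 ++ [r.2]))
    (PySem.Dict.empty, [])
  -- Python's max raises ValueError on an empty generator (N < 1): outside Pre_
  let kept := (PySem.List.max? st.2 (fun c => c.length)).getD []
  (PySem.List.pyRange 1 (N + 1)).filter (fun i => !(kept.contains i))

-- ===== PRECONDITION & SPEC =====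
-- Pre_ is exactly where A returns: A raises IndexError when N ≤ 0 (prev[best_end] with
-- best_end = 1 past the end) and when some op's row index p is outside [-(N+1), N]
-- (rows[p] out of range; negative p in range wraps, identically in A and B, and stays inside Pre_).
def Pre_solve (N : Int) (ops : List (Int × Int × Int)) : Prop :=
  1 ≤ N ∧ ∀ op ∈ ops, -(N + 1) ≤ op.1 ∧ op.1 ≤ N
instance (N : Int) (ops : List (Int × Int × Int)) : Decidable (Pre_solve N ops) := by
  unfold Pre_solve; infer_instance
def pvWitness_solve : Int × (List (Int × Int × Int)) := (3, [(1, 1, 3), (2, 2, 5), (3, 7, 9)])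

def Spec_solve (N : Int) (ops : List (Int × Int × Int)) (out : List Int) : Prop := out = solve_alt N ops
instance (N : Int) (ops : List (Int × Int × Int)) (out : List Int) : Decidable (Spec_solve N ops out) := by
  unfold Spec_solve; infer_instance

-- ===== CLAIM (what is proved, stated in full; the proofs are below) =====
def Claim_equal_solve : Prop := ∀ (N : Int) (ops : List (Int × Int × Int)), Dom_solve N ops → Pre_solve N ops → Spec_solve N ops (solve N ops)

-- ===== LEMMAS AND PROOFS =====

-- abbreviations used only in the proofs
def fval (dp : List Int) (i : Int) : Int := PySem.List.pyGetD dp i 0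
def pval (prev : List Int) (i : Int) : Int := PySem.List.pyGetD prev i (-1)

-- the running strict-improvement scan, abstracted over the score g and the test q
def runStep (g : Int → Int) (q : Int → Bool) (s : Int × Int) (i : Int) : Int × Int :=
  if g i > s.1 then (if q i then (g i, i) else s) else s

-- proof-side structured form of A's outer step: write the scalar scan results into row j
def stepP (rows : List (List (Int × Int))) (st : List Int × List Int) (j : Int) :
    List Int × List Int :=
  let r := (PySem.List.pyRange 1 j).foldl
    (runStep (fun i => fval st.1 i + 1)
      (fun i => intersects (PySem.List.pyGetD rows i []) (PySem.List.pyGetD rows j []))) (1, -1)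
  (PySem.List.pySetD st.1 j r.1, PySem.List.pySetD st.2 j r.2)

-- proof-side memo-free form of B's chain(j) loop body
def plainStep (rows : List (List (Int × Int))) (memo : PySem.Dict Int (List Int)) (j : Int)
    (best : List Int) (i : Int) : List Int :=
  if (memo.getD i []).length + 1 > best.length then
    if intersects (PySem.List.pyGetD rows i []) (PySem.List.pyGetD rows j []) then
      memo.getD i [] ++ [j]
    else best
  else best

-- the chain B stores for predecessor p
def chainRepr (memo : PySem.Dict Int (List Int)) (j p : Int) : List Int :=
  if p = -1 then [j] else memo.getD p [] ++ [j]

lemma pyGetD_set_ne {α : Type} (xs : List α) (k : Nat) (v : α) (i : Int) (d : α)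
    (h0 : 0 ≤ i) (hne : i ≠ (k : Int)) :
    PySem.List.pyGetD (xs.set k v) i d = PySem.List.pyGetD xs i d := by
  obtain ⟨n, rfl⟩ := Int.eq_ofNat_of_zero_le h0
  simp [PySem.List.pyGetD_natCast, List.getD, List.getElem?_set_ne (by omega : k ≠ n)]

lemma pyGetD_set_self {α : Type} (xs : List α) (k : Nat) (v : α) (d : α) (h : k < xs.length) :
    PySem.List.pyGetD (xs.set k v) (k : Int) d = v := by
  simp [PySem.List.pyGetD_natCast, List.getD, h]

lemma pySetD_set {α : Type} (xs : List α) (k : Nat) (v w : α) :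
    PySem.List.pySetD (xs.set k v) (k : Int) w = xs.set k w := by
  simp [PySem.List.pySetD_natCast, List.set_set]

-- A's inner loop over the full dp/prev lists is the scalar scan written into position j
lemma inner_to_scalar (rows : List (List (Int × Int))) (j : Int) (jn : Nat) (hj : (jn : Int) = j)
    (dp prev : List Int) (hdp : jn < dp.length) (hpr : jn < prev.length)
    (is : List Int) (his : ∀ i ∈ is, 1 ≤ i ∧ i < j) (d p : Int) :
    is.foldl (innerStepA rows j) (dp.set jn d, prev.set jn p) =
      (dp.set jn (is.foldl (runStep (fun i => fval dp i + 1)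
          (fun i => intersects (PySem.List.pyGetD rows i []) (PySem.List.pyGetD rows j []))) (d, p)).1,
       prev.set jn (is.foldl (runStep (fun i => fval dp i + 1)
          (fun i => intersects (PySem.List.pyGetD rows i []) (PySem.List.pyGetD rows j []))) (d, p)).2) := by
  induction is generalizing d p with
  | nil => rfl
  | cons i is ih =>
    obtain ⟨hi1, hij⟩ := his i List.mem_cons_self
    have his' : ∀ x ∈ is, 1 ≤ x ∧ x < j := fun x hx => his x (List.mem_cons_of_mem _ hx)
    have hne : i ≠ (jn : Int) := by omega
    have hread : PySem.List.pyGetD (dp.set jn d) i 0 = fval dp i :=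
      pyGetD_set_ne dp jn d i 0 (by omega) hne
    have hreadj : PySem.List.pyGetD (dp.set jn d) j 0 = d := by
      rw [← hj]; exact pyGetD_set_self dp jn d 0 hdp
    simp only [List.foldl_cons]
    rw [show innerStepA rows j (dp.set jn d, prev.set jn p) i =
        (dp.set jn ((runStep (fun i => fval dp i + 1)
            (fun i => intersects (PySem.List.pyGetD rows i []) (PySem.List.pyGetD rows j [])) (d, p) i).1),
         prev.set jn ((runStep (fun i => fval dp i + 1)
            (fun i => intersects (PySem.List.pyGetD rows i []) (PySem.List.pyGetD rows j [])) (d, p) i).2)) by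
      simp only [innerStepA, runStep, hread, hreadj]
      split_ifs with h1 h2 <;> first | (rw [← hj, pySetD_set, pySetD_set]) | rfl]
    rw [ih his']

-- the scalar scan never decreases its running value
lemma scan_fst_ge (g : Int → Int) (q : Int → Bool) (is : List Int) (d0 p0 : Int) :
    d0 ≤ (is.foldl (runStep g q) (d0, p0)).1 := by
  induction is generalizing d0 p0 with
  | nil => simp
  | cons i is ih =>
    simp only [List.foldl_cons, runStep]
    split_ifs with h1 h2
    · exact le_trans (by omega) (ih (g i) i)
    · exact ih d0 p0
    · exact ih d0 p0

-- the scalar scan's argmax is the start value or a scanned index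
lemma scan_snd_mem (g : Int → Int) (q : Int → Bool) (is : List Int) (d0 p0 : Int) :
    (is.foldl (runStep g q) (d0, p0)).2 = p0 ∨ (is.foldl (runStep g q) (d0, p0)).2 ∈ is := by
  induction is generalizing d0 p0 with
  | nil => simp
  | cons i is ih =>
    simp only [List.foldl_cons, runStep]
    split_ifs with h1 h2
    · rcases ih (g i) i with h | h
      · exact Or.inr (by rw [h]; exact List.mem_cons_self)
      · exact Or.inr (List.mem_cons_of_mem _ h)
    · rcases ih d0 p0 with h | h
      · exact Or.inl h
      · exact Or.inr (List.mem_cons_of_mem _ h)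
    · rcases ih d0 p0 with h | h
      · exact Or.inl h
      · exact Or.inr (List.mem_cons_of_mem _ h)

-- Stage 1: A's running state is the structured (dp, prev) fold plus the running best scan
lemma P_invariant (N : Int) (rows : List (List (Int × Int))) :
    ∀ b : Int, 1 ≤ b → b ≤ N + 1 →
    ((PySem.List.pyRange 1 b).foldl (outerStepA rows)
        (List.replicate (N + 1).toNat 0, List.replicate (N + 1).toNat (-1), 0, 1) =
      (((PySem.List.pyRange 1 b).foldl (stepP rows)
          (List.replicate (N + 1).toNat 0, List.replicate (N + 1).toNat (-1))).1,
       ((PySem.List.pyRange 1 b).foldl (stepP rows)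
          (List.replicate (N + 1).toNat 0, List.replicate (N + 1).toNat (-1))).2,
       (PySem.List.pyRange 1 b).foldl
         (runStep (fval ((PySem.List.pyRange 1 b).foldl (stepP rows)
            (List.replicate (N + 1).toNat 0, List.replicate (N + 1).toNat (-1))).1) (fun _ => true)) (0, 1)))
    ∧ ((PySem.List.pyRange 1 b).foldl (stepP rows)
          (List.replicate (N + 1).toNat 0, List.replicate (N + 1).toNat (-1))).1.length = (N + 1).toNat
    ∧ ((PySem.List.pyRange 1 b).foldl (stepP rows)
          (List.replicate (N + 1).toNat 0, List.replicate (N + 1).toNat (-1))).2.length = (N + 1).toNat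
    ∧ (∀ i : Int, 1 ≤ i → i < b → 1 ≤ fval ((PySem.List.pyRange 1 b).foldl (stepP rows)
          (List.replicate (N + 1).toNat 0, List.replicate (N + 1).toNat (-1))).1 i)
    ∧ (∀ i : Int, 0 ≤ i → (i < 1 ∨ b ≤ i) → fval ((PySem.List.pyRange 1 b).foldl (stepP rows)
          (List.replicate (N + 1).toNat 0, List.replicate (N + 1).toNat (-1))).1 i = 0)
    ∧ (∀ i : Int, 1 ≤ i → i < b →
        pval ((PySem.List.pyRange 1 b).foldl (stepP rows)
          (List.replicate (N + 1).toNat 0, List.replicate (N + 1).toNat (-1))).2 i < i ∧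
        (pval ((PySem.List.pyRange 1 b).foldl (stepP rows)
          (List.replicate (N + 1).toNat 0, List.replicate (N + 1).toNat (-1))).2 i = -1 ∨
         1 ≤ pval ((PySem.List.pyRange 1 b).foldl (stepP rows)
          (List.replicate (N + 1).toNat 0, List.replicate (N + 1).toNat (-1))).2 i)) := by
  intro b hb1
  induction b, hb1 using Int.le_induction with
  | base =>
    intro _
    rw [PySem.List.pyRange_one_eq_nil (le_refl 1)]
    refine ⟨rfl, by simp, by simp,
      fun i h1 h2 => absurd (lt_of_le_of_lt h1 h2) (by omega), ?_,
      fun i h1 h2 => absurd (lt_of_le_of_lt h1 h2) (by omega)⟩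
    intro i h0 _
    obtain ⟨n, rfl⟩ := Int.eq_ofNat_of_zero_le h0
    simp only [List.foldl_nil, fval, PySem.List.pyGetD_natCast, List.getD, List.getElem?_replicate]
    split <;> rfl
  | succ b hb ih =>
    intro hbN1
    obtain ⟨ihA, ihL1, ihL2, ihpos, ihzero, ihdesc⟩ := ih (by omega)
    set P := (PySem.List.pyRange 1 b).foldl (stepP rows)
      (List.replicate (N + 1).toNat 0, List.replicate (N + 1).toNat (-1)) with hP
    set m := (PySem.List.pyRange 1 b).foldl (runStep (fval P.1) (fun _ => true)) (0, 1) with hm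
    set bn := b.toNat with hbndef
    have hbn : ((bn : Nat) : Int) = b := Int.toNat_of_nonneg (by omega)
    have hlenD : bn < P.1.length := by rw [ihL1]; omega
    have hlenP : bn < P.2.length := by rw [ihL2]; omega
    set q := fun i => intersects (PySem.List.pyGetD rows i []) (PySem.List.pyGetD rows b []) with hq
    set r := (PySem.List.pyRange 1 b).foldl (runStep (fun i => fval P.1 i + 1) q) (1, -1) with hr
    have hmem : ∀ i ∈ PySem.List.pyRange 1 b, 1 ≤ i ∧ i < b :=
      fun i hi => PySem.List.mem_pyRange_one.mp hi
    rw [PySem.List.pyRange_one_succ_right (by omega : (1:Int) ≤ b)]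
    rw [List.foldl_append, List.foldl_append, ihA, ← hP]
    simp only [List.foldl_cons, List.foldl_nil]
    have hstepP : stepP rows P b = (P.1.set bn r.1, P.2.set bn r.2) := by
      simp only [stepP, ← hq, ← hr]
      rw [← hbn, PySem.List.pySetD_natCast, PySem.List.pySetD_natCast]
    have hinner : (PySem.List.pyRange 1 b).foldl (innerStepA rows b)
        (PySem.List.pySetD P.1 b 1, PySem.List.pySetD P.2 b (-1)) =
        (P.1.set bn r.1, P.2.set bn r.2) := by
      rw [← hbn, PySem.List.pySetD_natCast, PySem.List.pySetD_natCast, hbn]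
      exact inner_to_scalar rows b bn hbn P.1 P.2 hlenD hlenP _ hmem 1 (-1)
    have hvset : PySem.List.pyGetD (P.1.set bn r.1) b 0 = r.1 := by
      rw [← hbn]; exact pyGetD_set_self _ _ _ _ hlenD
    have hA : outerStepA rows (P.1, P.2, m) b =
        (P.1.set bn r.1, P.2.set bn r.2, runStep (fval (P.1.set bn r.1)) (fun _ => true) m b) := by
      simp only [outerStepA, hinner]
      simp only [runStep, fval, hvset]
      split_ifs <;> rfl
    have hcongr : List.foldl (runStep (fval (P.1.set bn r.1)) (fun _ => true)) ((0:Int), (1:Int))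
        (PySem.List.pyRange 1 b) = m := by
      rw [hm]
      apply PySem.List.foldl_congr_mem
      intro acc x hx
      obtain ⟨hx1, hx2⟩ := PySem.List.mem_pyRange_one.mp hx
      have hxne := pyGetD_set_ne P.1 bn r.1 x 0 (by omega) (by omega)
      simp only [runStep, fval, hxne]
    rw [hstepP, hA]
    simp only [List.foldl_append, List.foldl_cons, List.foldl_nil]
    rw [hcongr]
    have hr1 : (1:Int) ≤ r.1 := by rw [hr]; exact scan_fst_ge _ _ _ 1 (-1)
    refine ⟨rfl, by simp [ihL1], by simp [ihL2], ?_, ?_, ?_⟩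
    · intro i h1 h2
      by_cases hib : i = b
      · rw [hib, show fval (P.1.set bn r.1) b = r.1 from by
          rw [fval, ← hbn]; exact pyGetD_set_self _ _ _ _ hlenD]
        exact hr1
      · have hni := pyGetD_set_ne P.1 bn r.1 i 0 (by omega) (by omega)
        rw [fval, hni]
        exact ihpos i h1 (by omega)
    · intro i h0 hcases
      have hni := pyGetD_set_ne P.1 bn r.1 i 0 h0 (by omega)
      rw [fval, hni]
      exact ihzero i h0 (by omega)
    · intro i h1 h2
      by_cases hib : i = b
      · have hpvb : pval (P.2.set bn r.2) b = r.2 := by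
          rw [pval, ← hbn]; exact pyGetD_set_self _ _ _ _ hlenP
        rw [hib, hpvb]
        rcases scan_snd_mem (fun i => fval P.1 i + 1) q (PySem.List.pyRange 1 b) 1 (-1) with h | h
        · rw [← hr] at h; rw [h]; exact ⟨by omega, Or.inl rfl⟩
        · rw [← hr] at h
          obtain ⟨hh1, hh2⟩ := hmem _ h
          exact ⟨hh2, Or.inr hh1⟩
      · have hni := pyGetD_set_ne P.2 bn r.2 i (-1) (by omega) (by omega)
        rw [pval, hni]
        have := ihdesc i h1 (by omega)
        exact ⟨(this).1, (this).2⟩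

lemma collectA_acc (prev : List Int) :
    ∀ (f : Nat) (cur : Int) (acc : List Int),
      collectA prev f cur acc = acc ++ collectA prev f cur [] := by
  intro f
  induction f with
  | zero => intro cur acc; simp [collectA]
  | succ f ih =>
    intro cur acc
    by_cases h : cur = -1
    · simp [collectA, h]
    · simp only [collectA, if_neg h]
      rw [ih, ih _ ([] ++ [cur])]
      simp

-- fuel-insensitivity of the reconstruction walk along a descending prev chain
lemma collect_fuel (prev : List Int) (B : Int)
    (hdesc : ∀ x, 1 ≤ x → x < B → pval prev x < x ∧ (pval prev x = -1 ∨ 1 ≤ pval prev x)) :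
    ∀ (f1 : Nat), ∀ (f2 : Nat) (cur : Int), (cur = -1 ∨ (1 ≤ cur ∧ cur < B)) →
      cur.toNat < f1 → cur.toNat < f2 → collectA prev f1 cur [] = collectA prev f2 cur [] := by
  intro f1
  induction f1 with
  | zero => intro f2 cur hcur h1 h2; omega
  | succ f1 ih =>
    intro f2 cur hcur h1 h2
    obtain ⟨f2', rfl⟩ : ∃ f2', f2 = f2' + 1 := ⟨f2 - 1, by omega⟩
    rcases hcur with rfl | ⟨hc1, hc2⟩
    · simp [collectA]
    · have hne : cur ≠ -1 := by omega
      simp only [collectA, if_neg hne]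
      rw [collectA_acc prev f1 _ _, collectA_acc prev f2' _ _]
      obtain ⟨hlt, hdisj⟩ := hdesc cur hc1 hc2
      have : collectA prev f1 (PySem.List.pyGetD prev cur (-1)) [] =
          collectA prev f2' (PySem.List.pyGetD prev cur (-1)) [] := by
        apply ih f2' _ _ _ _
        · rcases hdisj with h | h
          · exact Or.inl h
          · exact Or.inr ⟨h, by unfold pval at hlt; omega⟩
        · unfold pval at hlt hdisj; rcases hdisj with h | h <;> [skip; skip] <;> omega
        · unfold pval at hlt hdisj; rcases hdisj with h | h <;> [skip; skip] <;> omega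
      rw [this]

-- writing prev at a position ≥ B does not change the walk from below B
lemma collect_set_high (prev : List Int) (B : Int) (bn : Nat) (v : Int) (hbn : B ≤ (bn : Int))
    (hdesc : ∀ x, 1 ≤ x → x < B → pval prev x < x ∧ (pval prev x = -1 ∨ 1 ≤ pval prev x)) :
    ∀ (f : Nat) (cur : Int), (cur = -1 ∨ (1 ≤ cur ∧ cur < B)) →
      collectA (prev.set bn v) f cur [] = collectA prev f cur [] := by
  intro f
  induction f with
  | zero => intro cur _; rfl
  | succ f ih =>
    intro cur hcur
    rcases hcur with rfl | ⟨hc1, hc2⟩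
    · simp [collectA]
    · have hne : cur ≠ -1 := by omega
      simp only [collectA, if_neg hne]
      have hread : PySem.List.pyGetD (prev.set bn v) cur (-1) = PySem.List.pyGetD prev cur (-1) :=
        pyGetD_set_ne prev bn v cur (-1) (by omega) (by omega)
      rw [hread, collectA_acc (prev.set bn v) f _ _, collectA_acc prev f _ _]
      obtain ⟨hlt, hdisj⟩ := hdesc cur hc1 hc2
      rw [ih (PySem.List.pyGetD prev cur (-1)) (by
        rcases hdisj with h | h
        · exact Or.inl h
        · exact Or.inr ⟨h, by unfold pval at hlt; omega⟩)]

-- chain(i) on a memoized i is a pure lookup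
lemma chainB_memoized (rows : List (List (Int × Int))) (f : Nat)
    (memo : PySem.Dict Int (List Int)) (i : Int) (c : List Int) (h : memo.get? i = some c) :
    chainB rows (f + 1) memo i = (memo, c) := by
  simp [chainB, h]

-- with every scanned index memoized, chain(j)'s loop leaves the memo alone
lemma inner_fold_plain (rows : List (List (Int × Int))) (f : Nat) (j : Int)
    (memo : PySem.Dict Int (List Int)) (is : List Int)
    (h : ∀ i ∈ is, (memo.get? i).isSome) :
    ∀ best, is.foldl (chainStepB rows (f + 1) j) (memo, best) =
      (memo, is.foldl (plainStep rows memo j) best) := by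
  intro best
  induction is generalizing best with
  | nil => rfl
  | cons i is ih =>
    obtain ⟨c, hc⟩ := Option.isSome_iff_exists.mp (h i List.mem_cons_self)
    have h' : ∀ x ∈ is, (memo.get? x).isSome := fun x hx => h x (List.mem_cons_of_mem _ hx)
    have hgd : memo.getD i [] = c := PySem.Dict.getD_of_get?_eq_some memo [] hc
    simp only [List.foldl_cons]
    rw [show chainStepB rows (f + 1) j (memo, best) i = (memo, plainStep rows memo j best i) by
      simp only [chainStepB, chainB_memoized rows f memo i c hc, plainStep, hgd]
      split_ifs <;> rfl]
    exact ih h' _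

-- B's memo-free loop is A's scalar scan, read through chainRepr
lemma plain_to_scalar (rows : List (List (Int × Int))) (memo : PySem.Dict Int (List Int))
    (j : Int) (dp : List Int) (is : List Int)
    (hlen : ∀ i ∈ is, ((memo.getD i []).length : Int) = fval dp i)
    (hpos : ∀ i ∈ is, 1 ≤ i) :
    ∀ (d p : Int), ((chainRepr memo j p).length : Int) = d →
      is.foldl (plainStep rows memo j) (chainRepr memo j p) =
        chainRepr memo j ((is.foldl (runStep (fun i => fval dp i + 1)
          (fun i => intersects (PySem.List.pyGetD rows i []) (PySem.List.pyGetD rows j []))) (d, p)).2) ∧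
      ((chainRepr memo j ((is.foldl (runStep (fun i => fval dp i + 1)
          (fun i => intersects (PySem.List.pyGetD rows i []) (PySem.List.pyGetD rows j []))) (d, p)).2)).length : Int) =
        (is.foldl (runStep (fun i => fval dp i + 1)
          (fun i => intersects (PySem.List.pyGetD rows i []) (PySem.List.pyGetD rows j []))) (d, p)).1 := by
  intro d p hd
  induction is generalizing d p with
  | nil => exact ⟨rfl, hd⟩
  | cons i is ih =>
    have hil : ((memo.getD i []).length : Int) = fval dp i := hlen i List.mem_cons_self
    have hi1 : 1 ≤ i := hpos i List.mem_cons_self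
    have hlen' : ∀ x ∈ is, ((memo.getD x []).length : Int) = fval dp x :=
      fun x hx => hlen x (List.mem_cons_of_mem _ hx)
    have hpos' : ∀ x ∈ is, 1 ≤ x := fun x hx => hpos x (List.mem_cons_of_mem _ hx)
    simp only [List.foldl_cons]
    by_cases hgt : fval dp i + 1 > d
    · have hgtN : (memo.getD i []).length + 1 > (chainRepr memo j p).length := by omega
      rw [show plainStep rows memo j (chainRepr memo j p) i =
            (if intersects (PySem.List.pyGetD rows i []) (PySem.List.pyGetD rows j []) then
              memo.getD i [] ++ [j] else chainRepr memo j p) from by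
            simp only [plainStep, if_pos hgtN]]
      rw [show runStep (fun i => fval dp i + 1)
            (fun i => intersects (PySem.List.pyGetD rows i []) (PySem.List.pyGetD rows j [])) (d, p) i =
            (if intersects (PySem.List.pyGetD rows i []) (PySem.List.pyGetD rows j []) then
              (fval dp i + 1, i) else (d, p)) from by
            simp only [runStep, if_pos hgt]]
      by_cases hq : intersects (PySem.List.pyGetD rows i []) (PySem.List.pyGetD rows j []) = true
      · rw [if_pos hq, if_pos hq]
        have hrep : memo.getD i [] ++ [j] = chainRepr memo j i := by
          simp [chainRepr, show i ≠ -1 by omega]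
        rw [hrep]
        exact ih hlen' hpos' (fval dp i + 1) i (by simp [← hrep]; omega)
      · rw [if_neg hq, if_neg hq]
        exact ih hlen' hpos' d p hd
    · have hgtN : ¬ ((memo.getD i []).length + 1 > (chainRepr memo j p).length) := by omega
      rw [show plainStep rows memo j (chainRepr memo j p) i = chainRepr memo j p from by
            simp only [plainStep, if_neg hgtN]]
      rw [show runStep (fun i => fval dp i + 1)
            (fun i => intersects (PySem.List.pyGetD rows i []) (PySem.List.pyGetD rows j [])) (d, p) i = (d, p) from by
            simp only [runStep, if_neg hgt]]
      exact ih hlen' hpos' d p hd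

lemma collect_neg1 (prev : List Int) : ∀ f : Nat, collectA prev f (-1) [] = [] := by
  intro f; cases f <;> simp [collectA]

-- Stage 2: B's memo holds exactly the reversed prev-walks of the structured fold
lemma memo_invariant (N : Int) (rows : List (List (Int × Int))) (hN : 1 ≤ N) :
    ∀ b : Int, 1 ≤ b → b ≤ N + 1 →
    (((PySem.List.pyRange 1 b).foldl
        (fun (st : PySem.Dict Int (List Int) × List (List Int)) j =>
          let r := chainB rows (N + 1).toNat st.1 j
          (r.1, st.2 ++ [r.2])) (PySem.Dict.empty, [])).1.keys = PySem.List.pyRange 1 b)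
    ∧ (((PySem.List.pyRange 1 b).foldl
        (fun (st : PySem.Dict Int (List Int) × List (List Int)) j =>
          let r := chainB rows (N + 1).toNat st.1 j
          (r.1, st.2 ++ [r.2])) (PySem.Dict.empty, [])).2 =
        (PySem.List.pyRange 1 b).map (fun j =>
          ((PySem.List.pyRange 1 b).foldl
            (fun (st : PySem.Dict Int (List Int) × List (List Int)) j =>
              let r := chainB rows (N + 1).toNat st.1 j
              (r.1, st.2 ++ [r.2])) (PySem.Dict.empty, [])).1.getD j []))
    ∧ (∀ j ∈ PySem.List.pyRange 1 b,
        ((((PySem.List.pyRange 1 b).foldl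
            (fun (st : PySem.Dict Int (List Int) × List (List Int)) j =>
              let r := chainB rows (N + 1).toNat st.1 j
              (r.1, st.2 ++ [r.2])) (PySem.Dict.empty, [])).1.getD j []).length : Int) =
          fval ((PySem.List.pyRange 1 b).foldl (stepP rows)
            (List.replicate (N + 1).toNat 0, List.replicate (N + 1).toNat (-1))).1 j)
    ∧ (∀ j ∈ PySem.List.pyRange 1 b,
        ((PySem.List.pyRange 1 b).foldl
            (fun (st : PySem.Dict Int (List Int) × List (List Int)) j =>
              let r := chainB rows (N + 1).toNat st.1 j
              (r.1, st.2 ++ [r.2])) (PySem.Dict.empty, [])).1.getD j [] =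
          (collectA ((PySem.List.pyRange 1 b).foldl (stepP rows)
            (List.replicate (N + 1).toNat 0, List.replicate (N + 1).toNat (-1))).2 (N + 2).toNat j []).reverse) := by
  intro b hb1
  induction b, hb1 using Int.le_induction with
  | base =>
    intro _
    rw [PySem.List.pyRange_one_eq_nil (le_refl 1)]
    refine ⟨by simp, rfl, ?_, ?_⟩ <;> (intro j hj; simp at hj)
  | succ b hb ih =>
    intro hbN1
    obtain ⟨K1, K2, K3, K4⟩ := ih (by omega)
    obtain ⟨-, PL1, PL2, Ppos, Pzero, Pdesc⟩ := P_invariant N rows b (by omega) (by omega)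
    set P := (PySem.List.pyRange 1 b).foldl (stepP rows)
      (List.replicate (N + 1).toNat 0, List.replicate (N + 1).toNat (-1)) with hP
    set Mst := (PySem.List.pyRange 1 b).foldl
      (fun (st : PySem.Dict Int (List Int) × List (List Int)) j =>
        let r := chainB rows (N + 1).toNat st.1 j
        (r.1, st.2 ++ [r.2])) (PySem.Dict.empty, []) with hMst
    set bn := b.toNat with hbndef
    have hbn : ((bn : Nat) : Int) = b := Int.toNat_of_nonneg (by omega)
    have hlenD : bn < P.1.length := by rw [PL1]; omega
    have hlenP : bn < P.2.length := by rw [PL2]; omega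
    set q := fun i => intersects (PySem.List.pyGetD rows i []) (PySem.List.pyGetD rows b []) with hq
    set r := (PySem.List.pyRange 1 b).foldl (runStep (fun i => fval P.1 i + 1) q) (1, -1) with hr
    have hmem : ∀ i ∈ PySem.List.pyRange 1 b, 1 ≤ i ∧ i < b :=
      fun i hi => PySem.List.mem_pyRange_one.mp hi
    have hstepP : stepP rows P b = (P.1.set bn r.1, P.2.set bn r.2) := by
      simp only [stepP, ← hq, ← hr]
      rw [← hbn, PySem.List.pySetD_natCast, PySem.List.pySetD_natCast]
    -- the new chain value
    have hnotmem : b ∉ (PySem.List.pyRange 1 b) := by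
      intro h; exact absurd (PySem.List.mem_pyRange_one.mp h).2 (by omega)
    have hnone : Mst.1.get? b = none := by
      rw [PySem.Dict.get?_eq_none_iff_not_mem_keys, K1]; exact hnotmem
    have hsome : ∀ i ∈ PySem.List.pyRange 1 b, (Mst.1.get? i).isSome := by
      intro i hi
      rw [Option.isSome_iff_ne_none, Ne, PySem.Dict.get?_eq_none_iff_not_mem_keys, K1]
      simp [hi]
    obtain ⟨Nn', hNn⟩ : ∃ k, N.toNat = k + 1 := ⟨N.toNat - 1, by omega⟩
    have hfuel : (N + 1).toNat = N.toNat + 1 := by omega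
    have hscal := plain_to_scalar rows Mst.1 b P.1 (PySem.List.pyRange 1 b) K3
      (fun i hi => (hmem i hi).1) 1 (-1) (by simp [chainRepr])
    rw [← hq, ← hr] at hscal
    have hchainb : chainB rows (N + 1).toNat Mst.1 b = (Mst.1.insert b (chainRepr Mst.1 b r.2), chainRepr Mst.1 b r.2) := by
      rw [hfuel]
      show chainB rows (N.toNat + 1) Mst.1 b = _
      rw [chainB, hnone]
      simp only
      rw [hNn, inner_fold_plain rows Nn' b Mst.1 (PySem.List.pyRange 1 b) hsome [b]]
      rw [show ([b] : List Int) = chainRepr Mst.1 b (-1) from by simp [chainRepr]]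
      rw [hscal.1]
    have hbne : ¬ Mst.1.contains b := by
      simp [PySem.Dict.contains_eq_isSome_get?, hnone]
    -- unfold one outer step on each side
    rw [PySem.List.pyRange_one_succ_right (by omega : (1:Int) ≤ b)]
    simp only [List.foldl_append, List.foldl_cons, List.foldl_nil, ← hMst, ← hP, hstepP, hchainb]
    have hK1' : (Mst.1.insert b (chainRepr Mst.1 b r.2)).keys = PySem.List.pyRange 1 b ++ [b] := by
      rw [PySem.Dict.keys_insert_of_not_contains _ _ (by simpa using hbne), K1]
    refine ⟨hK1', ?_, ?_, ?_⟩
    · rw [List.map_append, K2]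
      congr 1
      · apply List.map_congr_left
        intro j hj
        rw [PySem.Dict.getD_insert]
        rw [if_neg (by have := hmem j hj; omega)]
      · simp [PySem.Dict.getD_insert]
    · intro j hj
      rcases List.mem_append.mp hj with hj | hj
      · obtain ⟨hj1, hj2⟩ := hmem j hj
        rw [PySem.Dict.getD_insert, if_neg (by omega)]
        rw [show fval (P.1.set bn r.1) j = fval P.1 j from by
          unfold fval; exact pyGetD_set_ne P.1 bn r.1 j 0 (by omega) (by omega)]
        exact K3 j hj
      · have hjb : j = b := by simpa using hj
        rw [hjb, PySem.Dict.getD_insert, if_pos rfl]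
        rw [show fval (P.1.set bn r.1) b = r.1 from by
          unfold fval; rw [← hbn]; exact pyGetD_set_self _ _ _ _ hlenD]
        exact hscal.2
    · intro j hj
      rcases List.mem_append.mp hj with hj | hj
      · obtain ⟨hj1, hj2⟩ := hmem j hj
        rw [PySem.Dict.getD_insert, if_neg (by omega)]
        rw [show collectA (P.2.set bn r.2) (N + 2).toNat j [] = collectA P.2 (N + 2).toNat j [] from
          collect_set_high P.2 b bn r.2 (by omega) Pdesc _ j (Or.inr ⟨hj1, hj2⟩)]
        exact K4 j hj
      · have hjb : j = b := by simpa using hj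
        rw [hjb, PySem.Dict.getD_insert, if_pos rfl]
        have hfuel2 : (N + 2).toNat = (N + 1).toNat + 1 := by omega
        rw [hfuel2]
        rw [show collectA (P.2.set bn r.2) ((N + 1).toNat + 1) b [] =
            collectA (P.2.set bn r.2) (N + 1).toNat (PySem.List.pyGetD (P.2.set bn r.2) b (-1)) [b] from by
          rw [collectA, if_neg (by omega : b ≠ -1)]; simp]
        rw [show PySem.List.pyGetD (P.2.set bn r.2) b (-1) = r.2 from by
          rw [← hbn]; exact pyGetD_set_self _ _ _ _ hlenP]
        rw [collectA_acc]
        rcases scan_snd_mem (fun i => fval P.1 i + 1) q (PySem.List.pyRange 1 b) 1 (-1) with hp | hp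
        · rw [← hr] at hp; rw [hp, collect_neg1]
          simp [chainRepr]
        · rw [← hr] at hp
          obtain ⟨hp1, hp2⟩ := hmem _ hp
          rw [collect_set_high P.2 b bn r.2 (by omega) Pdesc _ r.2 (Or.inr ⟨hp1, hp2⟩)]
          rw [collect_fuel P.2 b Pdesc (N + 1).toNat (N + 2).toNat r.2 (Or.inr ⟨hp1, hp2⟩) (by omega) (by omega)]
          have := K4 r.2 hp
          rw [show collectA P.2 (N + 2).toNat r.2 [] = (Mst.1.getD r.2 []).reverse from by
            rw [this]; simp]
          simp [chainRepr, show r.2 ≠ -1 from by omega]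

-- Python's max(..., key=len) is the strict-improvement scan: it keeps the FIRST extremum
lemma max?_map_scan (F : Int → List Int) (g : Int → Int) (js : List Int)
    (hk : ∀ j ∈ js, ((F j).length : Int) = g j) (hg : ∀ j ∈ js, 1 ≤ g j) (hne : js ≠ []) :
    PySem.List.max? (js.map F) (fun c => c.length) =
      some (F ((js.foldl (runStep g (fun _ => true)) (0, 1)).2)) := by
  match js, hne with
  | j0 :: rest, _ =>
    have hk0 := hk j0 List.mem_cons_self
    have hg0 := hg j0 List.mem_cons_self
    have hk' : ∀ x ∈ rest, ((F x).length : Int) = g x := fun x hx => hk x (List.mem_cons_of_mem _ hx)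
    simp only [List.map_cons, PySem.List.max?, List.foldl_cons]
    rw [show runStep g (fun _ => true) (0, 1) j0 = (g j0, j0) from by
          simp [runStep, show g j0 > 0 by omega]]
    -- invariant: the accumulator is some (F p) with key length = running value
    clear hk hg hne hg0
    induction rest generalizing j0 with
    | nil => rfl
    | cons x rest ih =>
      have hkx := hk' x List.mem_cons_self
      have hk'' : ∀ y ∈ rest, ((F y).length : Int) = g y := fun y hy => hk' y (List.mem_cons_of_mem _ hy)
      simp only [List.map_cons, List.foldl_cons]
      by_cases hlt : (F j0).length < (F x).length
      · have hgt : g x > g j0 := by omega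
        rw [show runStep g (fun _ => true) (g j0, j0) x = (g x, x) from by simp [runStep, hgt]]
        rw [if_pos hlt]
        exact ih x (by simp) hkx hk''
      · have hgt : ¬ (g x > g j0) := by omega
        rw [show runStep g (fun _ => true) (g j0, j0) x = (g j0, j0) from by simp [runStep, hgt]]
        rw [if_neg hlt]
        exact ih j0 (by simp) hk0 hk''

lemma contains_ofList (l : List Int) (x : Int) :
    PySem.Set.contains (PySem.Set.ofList l) x = l.contains x := by
  rw [PySem.Set.contains_eq_listContains]
  by_cases h : x ∈ l <;>
    simp [h, PySem.Set.mem_ofList]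

-- ===== VERDICT (by name: the statement is the Claim_ definition above) =====
theorem solve_spec : Claim_equal_solve := by
  intro N ops _ hpre
  obtain ⟨hN, -⟩ := hpre
  show solve N ops = solve_alt N ops
  simp only [solve, solve_alt]
  set R := buildRows N ops with hR
  obtain ⟨hA, PL1, PL2, Ppos, Pzero, Pdesc⟩ := P_invariant N R (N + 1) (by omega) (le_refl _)
  obtain ⟨K1, K2, K3, K4⟩ := memo_invariant N R hN (N + 1) (by omega) (le_refl _)
  set P := (PySem.List.pyRange 1 (N + 1)).foldl (stepP R)
    (List.replicate (N + 1).toNat 0, List.replicate (N + 1).toNat (-1)) with hP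
  set Mst := (PySem.List.pyRange 1 (N + 1)).foldl
    (fun (st : PySem.Dict Int (List Int) × List (List Int)) j =>
      let r := chainB R (N + 1).toNat st.1 j
      (r.1, st.2 ++ [r.2])) (PySem.Dict.empty, []) with hMst
  set m := (PySem.List.pyRange 1 (N + 1)).foldl (runStep (fval P.1) (fun _ => true)) (0, 1) with hm
  rw [hA, K2]
  have h1mem : (1 : Int) ∈ PySem.List.pyRange 1 (N + 1) :=
    PySem.List.mem_pyRange_one.mpr ⟨le_refl 1, by omega⟩
  have hmax := max?_map_scan (fun j => Mst.1.getD j []) (fval P.1) (PySem.List.pyRange 1 (N + 1))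
    (fun j hj => K3 j hj)
    (fun j hj => Ppos j (PySem.List.mem_pyRange_one.mp hj).1 (PySem.List.mem_pyRange_one.mp hj).2)
    (List.ne_nil_of_mem h1mem)
  rw [hmax, ← hm]
  have hbe : m.2 ∈ PySem.List.pyRange 1 (N + 1) := by
    rcases scan_snd_mem (fval P.1) (fun _ => true) (PySem.List.pyRange 1 (N + 1)) 0 1 with h | h
    · rw [← hm] at h; rw [h]; exact h1mem
    · rw [← hm] at h; exact h
  have hkept : Mst.1.getD m.2 [] = (collectA P.2 (N + 2).toNat m.2 []).reverse := K4 m.2 hbe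
  simp only [Option.getD_some, hkept]
  apply List.filter_congr
  intro x _
  rw [contains_ofList]
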